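-- pv_equiv track=rewrite | github.com/AldoBaldo/Bioinformatics-Algorithms-Class-Work | bioinfo/utils.py | FindPatternLocations
-- ===== SOURCE A (Python) =====
-- def FindPatternLocations(sequence, pattern, max_hamming_distance=0):
--
--     locations = []
--     len_sequence = len(sequence)
--     len_pattern = len(pattern)
--     srch_count = len_sequence - len_pattern + 1
--
--     for i in range(0, srch_count):
--         if FindHammingDistance(pattern, sequence[i:i+len_pattern]) <= max_hamming_distance:
--             locations.append(i)
--
--     return locations
--
-- def FindHammingDistance(pattern_a, pattern_b):
--
--     hamming_distance = 0
--
--     for i in range(0, len(pattern_a)):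
--         if pattern_a[i] != pattern_b[i]:
--             hamming_distance += 1
--
--     return hamming_distance
-- ===== SOURCE B (Python) =====
-- def FindPatternLocations(sequence, pattern, max_hamming_distance=0):
--     n = len(sequence) - len(pattern) + 1
--     srch_count = n if n > 0 else 0
--     mismatches = [0] * srch_count
--     for j in range(len(pattern)):
--         pj = pattern[j]
--         for i in range(srch_count):
--             if pj != sequence[i + j]:
--                 mismatches[i] += 1
--     return [i for i in range(srch_count) if mismatches[i] <= max_hamming_distance]
-- ===== Notes on version B (the rewrite author's own statement) =====
-- stated objective: alternative
-- what changed: Transposed the loop nesting: instead of computing each window's Hamming distance independently via a helper, B keeps a per-window mismatch table, sweeps pattern positions in the outer loop incrementing every window's counter, then filters windows by the table.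
import Mathlib
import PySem

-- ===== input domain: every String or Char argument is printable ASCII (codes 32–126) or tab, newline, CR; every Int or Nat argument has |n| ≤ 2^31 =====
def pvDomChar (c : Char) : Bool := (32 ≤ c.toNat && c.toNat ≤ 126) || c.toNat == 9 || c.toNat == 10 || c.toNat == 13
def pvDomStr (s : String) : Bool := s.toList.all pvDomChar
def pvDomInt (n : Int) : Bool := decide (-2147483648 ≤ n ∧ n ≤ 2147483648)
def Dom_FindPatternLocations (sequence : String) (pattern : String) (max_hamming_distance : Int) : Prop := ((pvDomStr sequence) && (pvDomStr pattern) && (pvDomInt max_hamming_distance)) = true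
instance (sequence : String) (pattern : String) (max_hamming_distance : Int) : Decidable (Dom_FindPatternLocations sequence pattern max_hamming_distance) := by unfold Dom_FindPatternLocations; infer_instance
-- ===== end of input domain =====

-- B transposes the loop nesting (outer over pattern positions, inner over window starts) and keeps
-- a per-window mismatch table instead of computing each window's Hamming distance independently.


-- ===== PORT A =====
-- helper FindHammingDistance: at A's call sites pattern_b is a slice of pattern's full length, so
-- every pyGet? below is in range and comparing the options is exact.
def FindHammingDistance (pattern_a : List Char) (pattern_b : List Char) : Int :=
  (PySem.List.pyRange 0 (pattern_a.length : Int) 1).foldl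
    (fun hamming_distance i =>
      if PySem.List.pyGet? pattern_a i ≠ PySem.List.pyGet? pattern_b i then
        hamming_distance + 1
      else hamming_distance) 0

def FindPatternLocations (sequence : String) (pattern : String) (max_hamming_distance : Int) : List Int :=
  let seq := sequence.toList
  let pat := pattern.toList
  let srch_count : Int := (seq.length : Int) - (pat.length : Int) + 1
  (PySem.List.pyRange 0 srch_count 1).foldl
    (fun locations i =>
      if FindHammingDistance pat (PySem.List.slice seq (some i) (some (i + (pat.length : Int)))) ≤ max_hamming_distance then
        locations ++ [i]
      else locations) []

-- ===== PORT B =====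
def FindPatternLocations_alt (sequence : String) (pattern : String) (max_hamming_distance : Int) : List Int :=
  let seq := sequence.toList
  let pat := pattern.toList
  let n : Int := (seq.length : Int) - (pat.length : Int) + 1
  let srch_count : Int := if 0 < n then n else 0
  let mismatches : List Int := List.replicate srch_count.toNat 0
  let mismatches :=
    (PySem.List.pyRange 0 (pat.length : Int) 1).foldl
      (fun mism j =>
        let pj := PySem.List.pyGet? pat j
        (PySem.List.pyRange 0 srch_count 1).foldl
          (fun mism i =>
            if pj ≠ PySem.List.pyGet? seq (i + j) then mism.modify i.toNat (· + 1) else mism)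
          mism)
      mismatches
  (PySem.List.pyRange 0 srch_count 1).foldl
    (fun acc i => if PySem.List.pyGetD mismatches i 0 ≤ max_hamming_distance then acc ++ [i] else acc) []

-- ===== PRECONDITION & SPEC =====
def Spec_FindPatternLocations (sequence : String) (pattern : String) (max_hamming_distance : Int) (out : List Int) : Prop := out = FindPatternLocations_alt sequence pattern max_hamming_distance
instance (sequence : String) (pattern : String) (max_hamming_distance : Int) (out : List Int) : Decidable (Spec_FindPatternLocations sequence pattern max_hamming_distance out) := by unfold Spec_FindPatternLocations; infer_instance

-- ===== CLAIM (what is proved, stated in full; the proofs are below) =====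
def Claim_equal_FindPatternLocations : Prop := ∀ (sequence : String) (pattern : String) (max_hamming_distance : Int), Dom_FindPatternLocations sequence pattern max_hamming_distance → Spec_FindPatternLocations sequence pattern max_hamming_distance (FindPatternLocations sequence pattern max_hamming_distance)

-- ===== LEMMAS AND PROOFS =====

-- the inner sweep of B preserves the table's length
theorem pv_len_inner (pj : Option Char) (seq : List Char) (j : Int) (idx : List Int) (l : List Int) :
    (idx.foldl (fun mism i => if pj ≠ PySem.List.pyGet? seq (i + j) then mism.modify i.toNat (· + 1) else mism) l).length
      = l.length := by
  induction idx generalizing l with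
  | nil => rfl
  | cons a t ih =>
      simp only [List.foldl_cons]
      rw [ih]
      split
      · exact List.length_modify ..
      · rfl

theorem pv_getD_modify (l : List Int) (i k : Nat) (hk : k < l.length) :
    (l.modify i (· + 1)).getD k 0 = if i = k then l.getD k 0 + 1 else l.getD k 0 := by
  rw [List.getD_eq_getElem?_getD, List.getD_eq_getElem?_getD, List.getElem?_modify,
    List.getElem?_eq_getElem hk]
  split <;> simp

-- effect of one inner sweep (pattern position j) on entry k of the table
theorem pv_getD_inner (pj : Option Char) (seq : List Char) (j : Int) (N : Nat) (l : List Int) (k : Nat)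
    (hk : k < l.length) :
    (((List.range N).map (fun i : Nat => (i : Int))).foldl
        (fun mism i => if pj ≠ PySem.List.pyGet? seq (i + j) then mism.modify i.toNat (· + 1) else mism) l).getD k 0
      = l.getD k 0 + (if k < N ∧ pj ≠ PySem.List.pyGet? seq ((k : Int) + j) then 1 else 0) := by
  induction N generalizing l with
  | zero => simp
  | succ n ih =>
      rw [List.range_succ]
      simp only [List.map_append, List.foldl_append, List.map_cons, List.map_nil,
        List.foldl_cons, List.foldl_nil, Int.toNat_natCast]
      have hlen := pv_len_inner pj seq j ((List.range n).map (fun i : Nat => (i : Int))) l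
      by_cases hc : pj ≠ PySem.List.pyGet? seq ((n : Int) + j)
      · rw [if_pos hc, pv_getD_modify _ _ _ (by omega), ih _ hk]
        by_cases hkn : n = k
        · subst hkn
          simp [hc]
        · have : (k < n ∧ pj ≠ PySem.List.pyGet? seq ((k : Int) + j))
              ↔ (k < n + 1 ∧ pj ≠ PySem.List.pyGet? seq ((k : Int) + j)) := by
            constructor <;> rintro ⟨h1, h2⟩ <;> exact ⟨by omega, h2⟩
          rw [if_neg hkn]; simp only [this]
      · rw [if_neg hc, ih _ hk]
        by_cases hkn : n = k
        · subst hkn; simp [hc]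
        · have : (k < n ∧ pj ≠ PySem.List.pyGet? seq ((k : Int) + j))
              ↔ (k < n + 1 ∧ pj ≠ PySem.List.pyGet? seq ((k : Int) + j)) := by
            constructor <;> rintro ⟨h1, h2⟩ <;> exact ⟨by omega, h2⟩
          simp only [this]

theorem pv_len_outer (seq pat : List Char) (N : Nat) (J : List Int) (l : List Int) :
    (J.foldl (fun mism j =>
        ((List.range N).map (fun i : Nat => (i : Int))).foldl
          (fun mism i => if PySem.List.pyGet? pat j ≠ PySem.List.pyGet? seq (i + j) then mism.modify i.toNat (· + 1) else mism) mism) l).length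
      = l.length := by
  induction J generalizing l with
  | nil => rfl
  | cons a t ih =>
      simp only [List.foldl_cons]
      rw [ih, pv_len_inner]

-- after the full transposed double loop, entry k of the table is window k's mismatch count
theorem pv_getD_outer (seq pat : List Char) (N L k : Nat) (hk : k < N) :
    ((((List.range L).map (fun j : Nat => (j : Int))).foldl
        (fun mism j =>
          ((List.range N).map (fun i : Nat => (i : Int))).foldl
            (fun mism i => if PySem.List.pyGet? pat j ≠ PySem.List.pyGet? seq (i + j) then mism.modify i.toNat (· + 1) else mism) mism)
        (List.replicate N (0 : Int))).getD k 0 : Int)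
      = ((List.range L).countP (fun j => pat[j]? != seq[k + j]?) : Int) := by
  induction L with
  | zero => simp [List.getD_eq_getElem?_getD, hk]
  | succ n ih =>
      rw [List.range_succ]
      simp only [List.map_append, List.foldl_append, List.map_cons, List.map_nil,
        List.foldl_cons, List.foldl_nil, List.countP_append]
      have hlen : (((List.range n).map (fun j : Nat => (j : Int))).foldl
          (fun mism j =>
            ((List.range N).map (fun i : Nat => (i : Int))).foldl
              (fun mism i => if PySem.List.pyGet? pat j ≠ PySem.List.pyGet? seq (i + j) then mism.modify i.toNat (· + 1) else mism) mism)
          (List.replicate N (0 : Int))).length = N := by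
        rw [pv_len_outer, List.length_replicate]
      rw [pv_getD_inner _ _ _ _ _ _ (by omega), ih]
      have hcmp : (PySem.List.pyGet? pat (n : Int) ≠ PySem.List.pyGet? seq ((k : Int) + (n : Int)))
          ↔ (pat[n]? != seq[k + n]?) = true := by
        rw [show ((k : Int) + (n : Int)) = ((k + n : Nat) : Int) by push_cast; ring]
        rw [PySem.List.pyGet?_natCast, PySem.List.pyGet?_natCast]
        simp [bne_iff_ne]
      by_cases hc : (pat[n]? != seq[k + n]?) = true
      · rw [if_pos ⟨hk, hcmp.mpr hc⟩]
        simp [hc]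
      · rw [if_neg (by rintro ⟨-, h2⟩; exact hc (hcmp.mp h2))]
        simp [hc]

-- A's helper on window k equals window k's mismatch count
theorem pv_ham (seq pat : List Char) (k : Nat) :
    FindHammingDistance pat (PySem.List.slice seq (some (k : Int)) (some ((k : Int) + (pat.length : Int))))
      = ((List.range pat.length).countP (fun j => pat[j]? != seq[k + j]?) : Int) := by
  unfold FindHammingDistance
  rw [PySem.List.slice_natCast_add, PySem.List.pyRange_zero_nat, List.foldl_map,
    PySem.List.foldl_ite_add_one
      (p := fun j : Nat => PySem.List.pyGet? pat (j : Int) ≠ PySem.List.pyGet? ((seq.drop k).take pat.length) (j : Int))]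
  rw [List.countP_congr, Int.zero_add]
  intro j hj
  rw [List.mem_range] at hj
  rw [decide_eq_true_iff]
  rw [PySem.List.pyGet?_natCast, PySem.List.pyGet?_natCast, List.getElem?_take, if_pos hj,
    List.getElem?_drop]
  simp [bne_iff_ne]

-- ===== VERDICT (by name: the statement is the Claim_ definition above) =====
theorem FindPatternLocations_spec : Claim_equal_FindPatternLocations := by
  intro sequence pattern m _
  unfold Spec_FindPatternLocations
  simp only [FindPatternLocations, FindPatternLocations_alt]
  set seq := sequence.toList with hseq
  set pat := pattern.toList with hpat
  set n : Int := (seq.length : Int) - (pat.length : Int) + 1 with hn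
  set N : Nat := n.toNat with hN
  have hsr : (if 0 < n then n else 0) = (N : Int) := by rw [hN]; split <;> omega
  rw [hsr, Int.toNat_natCast, PySem.List.pyRange_zero, PySem.List.pyRange_zero_nat,
    PySem.List.pyRange_zero_nat]
  rw [show n.toNat = N from rfl]
  apply PySem.List.foldl_congr_mem
  intro acc i hi
  rw [List.mem_map] at hi
  obtain ⟨k, hk, rfl⟩ := hi
  rw [List.mem_range] at hk
  rw [pv_ham seq pat k, PySem.List.pyGetD_natCast,
    pv_getD_outer seq pat N pat.length k hk]
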